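-- pv_equiv track=rewrite | github.com/kianaghassabi/error-pattern-processing | countNumofErrors.py | burstErrorCalculator
-- ===== SOURCE A (Python) =====
-- def burstErrorCalculator(list):
--
--     burstErrorData = []
--     for i in range(31):
--         burstErrorData.append(0)
--
--     for i in range(len(list)):
--         continuousCounter = 0
--         for j in range(1, len(list[i])):
--             if (list[i][j-1] + 1 == list[i][j]):
--                 continuousCounter += 1
--             else:
--                 burstErrorData[continuousCounter] += 1
--                 continuousCounter = 0
--     return burstErrorData
-- ===== SOURCE B (Python) =====
-- def burstErrorCalculator(list):
--     burstErrorData = [0] * 31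
--     for row in list:
--         # '1' per adjacent consecutive pair, '0' per break
--         bits = ''.join('1' if a + 1 == b else '0' for a, b in zip(row, row[1:]))
--         # segments between breaks; the trailing segment is never flushed
--         for seg in bits.split('0')[:-1]:
--             burstErrorData[len(seg)] += 1
--     return burstErrorData
-- ===== Notes on version B (the rewrite author's own statement) =====
-- stated objective: alternative
-- what changed: Replaces A's index-driven (bucket, counter) state machine with a per-row '1'/'0' break string built from zip(row, row[1:]), split on '0', bucketing the length of every segment except the trailing one.
import Mathlib
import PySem

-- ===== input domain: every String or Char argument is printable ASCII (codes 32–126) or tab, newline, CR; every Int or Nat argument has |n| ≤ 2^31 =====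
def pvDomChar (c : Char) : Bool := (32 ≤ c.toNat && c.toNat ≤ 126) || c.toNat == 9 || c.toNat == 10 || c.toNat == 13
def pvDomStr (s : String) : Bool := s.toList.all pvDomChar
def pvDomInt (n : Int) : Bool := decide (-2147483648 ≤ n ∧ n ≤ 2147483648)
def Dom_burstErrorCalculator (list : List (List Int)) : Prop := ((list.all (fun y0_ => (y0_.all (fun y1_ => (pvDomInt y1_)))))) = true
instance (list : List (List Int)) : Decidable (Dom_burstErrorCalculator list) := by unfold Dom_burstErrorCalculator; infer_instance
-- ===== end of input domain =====

-- B replaces A's index-driven counter loop by building a '1'/'0' break string per row and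
-- splitting it on '0' — a different decomposition of the same cost; A = B on all non-raising inputs.

-- ===== PORT A =====
-- Body of A's inner loop over one row (j runs over range(1, len(row))); the counter is a Nat
-- (Python's counter starts at 0 and only increments before each reset, never negative).
-- Python's `burstErrorData[continuousCounter] += 1` raises IndexError for counter ≥ 31; those
-- inputs are excluded by Pre_ below, so the port's List.modify (no-op out of range) is exact on Pre_.
def pvRowA (bed : List Int) (row : List Int) : List Int :=
  ((PySem.List.pyRange 1 (row.length : Int) 1).foldl
    (fun (s : List Int × Nat) j =>
      if PySem.List.pyGetD row (j - 1) 0 + 1 = PySem.List.pyGetD row j 0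
      then (s.1, s.2 + 1)
      else (s.1.modify s.2 (· + 1), 0))
    (bed, 0)).1

def burstErrorCalculator (list : List (List Int)) : List Int :=
  let burstErrorData := (List.range 31).foldl (fun b _ => b ++ [(0 : Int)]) []
  (PySem.List.pyRange 0 (list.length : Int) 1).foldl
    (fun bed i => pvRowA bed (PySem.List.pyGetD list i [])) burstErrorData

-- ===== PORT B =====
-- Body of B's per-row step: `''.join(...)` over `zip(row, row[1:])`, then `s.split('0')[:-1]`,
-- ported as List.splitOn '0' / dropLast; Python's `burstErrorData[len(seg)] += 1` raises
-- IndexError for len ≥ 31, excluded by Pre_ (so List.modify is exact there).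
def pvRowB (bed : List Int) (row : List Int) : List Int :=
  let bits := (row.zip (row.drop 1)).map (fun p => if p.1 + 1 = p.2 then '1' else '0')
  ((bits.splitOn '0').dropLast).foldl (fun b seg => b.modify seg.length (· + 1)) bed

def burstErrorCalculator_alt (list : List (List Int)) : List Int :=
  list.foldl pvRowB (List.replicate 31 (0 : Int))

-- ===== PRECONDITION & SPEC =====
-- Pre_ excludes exactly the inputs on which Python A raises IndexError (a flushed run of ≥ 31
-- consecutive increments, i.e. 31 consecutive pairs immediately followed by a break); Python B
-- raises IndexError on exactly the same inputs.
def Pre_burstErrorCalculator (list : List (List Int)) : Prop :=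
  ∀ row ∈ list, ∀ i < row.length, i + 32 < row.length →
    (∀ k < 31, row.getD (i + k) 0 + 1 = row.getD (i + k + 1) 0) →
    row.getD (i + 31) 0 + 1 = row.getD (i + 32) 0
instance (list : List (List Int)) : Decidable (Pre_burstErrorCalculator list) := by
  unfold Pre_burstErrorCalculator; infer_instance

def pvWitness_burstErrorCalculator : List (List Int) := [[1, 2, 4, 4], [5], []]

def Spec_burstErrorCalculator (list : List (List Int)) (out : List Int) : Prop := out = burstErrorCalculator_alt list
instance (list : List (List Int)) (out : List Int) : Decidable (Spec_burstErrorCalculator list out) := by unfold Spec_burstErrorCalculator; infer_instance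

-- ===== CLAIM (what is proved, stated in full; the proofs are below) =====
def Claim_equal_burstErrorCalculator : Prop := ∀ (list : List (List Int)), Dom_burstErrorCalculator list → Pre_burstErrorCalculator list → Spec_burstErrorCalculator list (burstErrorCalculator list)

-- ===== LEMMAS AND PROOFS =====

-- A's 31-append loop builds the same list as B's replicate.
theorem pvInit_eq (n : Nat) (acc : List Int) :
    (List.range n).foldl (fun b _ => b ++ [(0 : Int)]) acc = acc ++ List.replicate n 0 := by
  induction n with
  | zero => simp
  | succ n ih =>
      simp [List.range_succ, List.foldl_append, ih, List.replicate_succ', List.append_assoc]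

-- splitting off a leading run of '1's at a '0'
theorem pvSplit_run (c : Nat) (rest : List Char) :
    (List.replicate c '1' ++ '0' :: rest).splitOnP (· == '0')
      = List.replicate c '1' :: rest.splitOnP (· == '0') := by
  induction c with
  | zero => simp [List.splitOnP_cons]
  | succ c ih =>
      rw [List.replicate_succ, List.cons_append, List.splitOnP_cons]
      simp [ih]

-- core invariant: A's (bucket, counter) loop over the pair list equals B's split-and-bucket
-- fold, the pending counter represented as a leading run of '1's.
theorem pvCore (ps : List (Int × Int)) (bed : List Int) (c : Nat) :
    (ps.foldl
        (fun (s : List Int × Nat) p =>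
          if p.1 + 1 = p.2 then (s.1, s.2 + 1) else (s.1.modify s.2 (· + 1), 0))
        (bed, c)).1
      = (((List.replicate c '1'
            ++ ps.map (fun p => if p.1 + 1 = p.2 then '1' else '0')).splitOnP
              (· == '0')).dropLast).foldl
          (fun b seg => b.modify seg.length (· + 1)) bed := by
  induction ps generalizing bed c with
  | nil =>
      rw [List.foldl_nil, List.map_nil, List.append_nil,
        List.splitOnP_eq_single _ _ (by simp)]
      simp
  | cons p t ih =>
      by_cases h : p.1 + 1 = p.2
      · simp only [List.foldl_cons, List.map_cons, if_pos h]
        rw [ih]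
        have h1 : (List.replicate c '1' : List Char)
              ++ '1' :: t.map (fun p => if p.1 + 1 = p.2 then '1' else '0')
            = List.replicate (c + 1) '1'
              ++ t.map (fun p => if p.1 + 1 = p.2 then '1' else '0') := by
          rw [List.replicate_succ', List.append_assoc]; rfl
        rw [h1]
      · simp only [List.foldl_cons, List.map_cons, if_neg h]
        rw [ih]
        rw [pvSplit_run,
          List.dropLast_cons_of_ne_nil (List.splitOnP_ne_nil _ _)]
        simp

-- the index list over range(1, len) with getD equals the adjacent-pair zip list
theorem pvPairs (row : List Int) :
    (List.range (row.length - 1)).map (fun k => (row.getD k 0, row.getD (k + 1) 0))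
      = row.zip (row.drop 1) := by
  apply List.ext_getElem
  · simp only [List.length_map, List.length_range, List.length_zip, List.length_drop]; omega
  · intro i h1 h2
    have hlen : i + 1 < row.length := by simp [List.length_zip] at h2; omega
    simp only [List.getElem_map, List.getElem_range, List.getElem_zip, List.getElem_drop]
    rw [List.getD_eq_getElem row 0 (by omega : i < row.length), List.getD_eq_getElem row 0 hlen]
    have h3 : 1 + i = i + 1 := Nat.add_comm 1 i
    simp [h3]

-- per-row agreement of the two ports' row steps
theorem pvRow_eq (bed row : List Int) : pvRowA bed row = pvRowB bed row := by
  unfold pvRowA pvRowB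
  rw [PySem.List.pyRange_one, List.foldl_map]
  have hn : ((row.length : Int) - 1).toNat = row.length - 1 := by omega
  have hstep : ∀ (s : List Int × Nat) (k : Nat),
      (if PySem.List.pyGetD row (1 + (k : Int) - 1) 0 + 1 = PySem.List.pyGetD row (1 + (k : Int)) 0
       then (s.1, s.2 + 1) else (s.1.modify s.2 (· + 1), 0))
    = (if row.getD k 0 + 1 = row.getD (k + 1) 0
       then (s.1, s.2 + 1) else (s.1.modify s.2 (· + 1), 0)) := by
    intro s k
    have e1 : 1 + (k : Int) - 1 = (k : Int) := by ring
    have e2 : 1 + (k : Int) = ((k + 1 : Nat) : Int) := by push_cast; ring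
    rw [e1, e2, PySem.List.pyGetD_natCast, PySem.List.pyGetD_natCast]
  calc ((List.range ((row.length : Int) - 1).toNat).foldl
          (fun (s : List Int × Nat) (k : Nat) =>
            if PySem.List.pyGetD row (1 + (k : Int) - 1) 0 + 1 = PySem.List.pyGetD row (1 + (k : Int)) 0
            then (s.1, s.2 + 1) else (s.1.modify s.2 (· + 1), 0)) (bed, 0)).1
      = ((List.range (row.length - 1)).foldl
          (fun (s : List Int × Nat) k =>
            if row.getD k 0 + 1 = row.getD (k + 1) 0
            then (s.1, s.2 + 1) else (s.1.modify s.2 (· + 1), 0)) (bed, 0)).1 := by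
        rw [hn]; congr 1; exact List.foldl_ext _ _ _ (fun s k _ => hstep s k)
    _ = (((List.range (row.length - 1)).map (fun k => (row.getD k 0, row.getD (k + 1) 0))).foldl
          (fun (s : List Int × Nat) p =>
            if p.1 + 1 = p.2 then (s.1, s.2 + 1) else (s.1.modify s.2 (· + 1), 0)) (bed, 0)).1 := by
        rw [List.foldl_map]
    _ = _ := by
        rw [pvPairs, pvCore]
        simp [List.splitOn]

-- ===== VERDICT (by name: the statement is the Claim_ definition above) =====
theorem burstErrorCalculator_spec : Claim_equal_burstErrorCalculator := by
  intro list _ _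
  unfold Spec_burstErrorCalculator burstErrorCalculator burstErrorCalculator_alt
  rw [pvInit_eq, List.nil_append,
    PySem.List.foldl_pyRange_zero_pyGetD' list [] pvRowA (List.replicate 31 0)]
  exact List.foldl_ext _ _ _ (fun bed row _ => pvRow_eq bed row)
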